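-- pv_equiv track=rewrite | github.com/Mekdeskebede/competitive-programming | A_Two_Substrings.py | solve
-- ===== SOURCE A (Python) =====
-- def solve(s):
--     ab = None
--     ba = None
--     for i in range(len(s)-1):
--         if s[i:i+2] == "AB":
--             if ba!= None and abs(i-ba) >= 2:
--                 return True
--             if ab!=None:
--                 ab = min(i,ab)
--             else:
--                 ab = i
--         if s[i:i+2] == "BA":
--             if ab != None and abs(i-ab) >= 2:
--                 return True
--             if ba!=None:
--                 ba = min(i,ba)
--             else:
--                 ba = i
--     return False
-- ===== SOURCE B (Python) =====
-- def solve(s):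
--     ab = s.find("AB")
--     ba = s.find("BA")
--     if ab == -1 or ba == -1:
--         return False
--     return s.find("AB", ba + 2) != -1 or s.find("BA", ab + 2) != -1
-- ===== Notes on version B (the rewrite author's own statement) =====
-- stated objective: simpler
-- what changed: Replaced A's single stateful scan (tracking earliest AB/BA positions with early return) by four library substring searches and a closed-form test: find the first AB and first BA, then look for an AB at least 2 past the first BA or a BA at least 2 past the first AB.
import Mathlib
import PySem

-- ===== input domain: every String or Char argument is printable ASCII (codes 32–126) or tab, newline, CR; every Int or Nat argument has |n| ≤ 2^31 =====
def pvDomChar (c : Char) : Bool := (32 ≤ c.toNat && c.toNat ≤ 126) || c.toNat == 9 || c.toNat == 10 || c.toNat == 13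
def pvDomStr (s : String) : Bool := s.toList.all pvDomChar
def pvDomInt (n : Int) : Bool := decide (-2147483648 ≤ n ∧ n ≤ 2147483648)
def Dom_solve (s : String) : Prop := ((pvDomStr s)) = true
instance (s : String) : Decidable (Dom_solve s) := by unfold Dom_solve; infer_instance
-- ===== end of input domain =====

-- B replaces A's stateful scan (earliest-AB/earliest-BA bookkeeping with early return) by
-- four library substring searches and a closed-form test; objective: simpler.

-- ===== PORT A =====
-- literal transliteration of A's loop: i runs over range(len(s)-1), state (ab, ba) holds the
-- earliest "AB"/"BA" start seen so far (None = not seen), early return True becomes returning true.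
def solveGo (cs : List Char) : List Int → Option Int → Option Int → Bool
  | [], _, _ => false
  | i :: rest, ab, ba =>
    let pair := PySem.List.slice cs (some i) (some (i + 2))
    -- if s[i:i+2] == "AB":
    if (decide (pair = ['A', 'B']) &&
        (match ba with | some b => decide (2 ≤ |i - b|) | none => false)) then
      true
    else
      let ab := if pair = ['A', 'B'] then
                  (match ab with | some a => some (min i a) | none => some i)
                else ab
      -- if s[i:i+2] == "BA":
      if (decide (pair = ['B', 'A']) &&
          (match ab with | some a => decide (2 ≤ |i - a|) | none => false)) then
        true
      else
        let ba := if pair = ['B', 'A'] then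
                    (match ba with | some b => some (min i b) | none => some i)
                  else ba
        solveGo cs rest ab ba

def solve (s : String) : Bool :=
  let cs := s.toList
  solveGo cs (PySem.List.pyRange 0 ((cs.length : Int) - 1) 1) none none

-- ===== PORT B =====
def solve_alt (s : String) : Bool :=
  let ab := PySem.Str.find s "AB"
  let ba := PySem.Str.find s "BA"
  if ab = -1 ∨ ba = -1 then false
  else decide (PySem.Str.findFrom s "AB" (ba + 2) ≠ -1) ||
       decide (PySem.Str.findFrom s "BA" (ab + 2) ≠ -1)

-- ===== PRECONDITION & SPEC =====
def Spec_solve (s : String) (out : Bool) : Prop := out = solve_alt s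
instance (s : String) (out : Bool) : Decidable (Spec_solve s out) := by unfold Spec_solve; infer_instance

-- ===== CLAIM (what is proved, stated in full; the proofs are below) =====
def Claim_equal_solve : Prop := ∀ (s : String), Dom_solve s → Spec_solve s (solve s)

-- ===== LEMMAS AND PROOFS =====

-- "AB" starts at index i of cs
def hasAB (cs : List Char) (i : Nat) : Prop := ['A', 'B'] <+: cs.drop i
def hasBA (cs : List Char) (i : Nat) : Prop := ['B', 'A'] <+: cs.drop i

-- a non-overlapping pair exists
def Pgood (cs : List Char) : Prop :=
  ∃ i j, hasAB cs i ∧ hasBA cs j ∧ (i + 2 ≤ j ∨ j + 2 ≤ i)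

lemma slice_eq_pair_iff (cs : List Char) (k : Nat) (c₀ c₁ : Char) :
    PySem.List.slice cs (some (k : Int)) (some ((k : Int) + 2)) = [c₀, c₁] ↔
      [c₀, c₁] <+: cs.drop k := by
  have h2 : ((k : Int) + 2) = (k : Int) + ((2 : Nat) : Int) := by norm_num
  rw [h2, PySem.List.slice_natCast_add, List.prefix_iff_eq_take]
  constructor
  · intro h; exact h.symm
  · intro h; exact h.symm

lemma prefix2_length {cs : List Char} {k : Nat} {c₀ c₁ : Char}
    (h : [c₀, c₁] <+: cs.drop k) : k + 2 ≤ cs.length := by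
  have := h.length_le
  simp [List.length_drop] at this
  omega

lemma not_both {cs : List Char} {k : Nat} (hA : hasAB cs k) (hB : hasBA cs k) : False := by
  unfold hasAB at hA; unfold hasBA at hB
  rw [List.prefix_iff_eq_take] at hA hB
  simp only [List.length_cons, List.length_nil] at hA hB
  rw [← hA] at hB
  simp at hB

lemma infix_iff_exists (sub cs : List Char) : sub <:+: cs ↔ ∃ j, sub <+: cs.drop j := by
  rw [← PySem.Chars.isIn_iff_infix, ← PySem.Chars.exists_prefix_drop_iff_isIn]

-- invariant for the state (minimal seen occurrence, over processed indices < k)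
def GoodMin (Q : Nat → Prop) (k : Nat) : Option Int → Prop
  | none => ∀ i, i < k → ¬ Q i
  | some a => ∃ aN : Nat, a = (aN : Int) ∧ aN < k ∧ Q aN ∧ ∀ i, Q i → aN ≤ i

def LoopInv (cs : List Char) (k : Nat) (ab ba : Option Int) : Prop :=
  GoodMin (hasAB cs) k ab ∧ GoodMin (hasBA cs) k ba ∧
  ∀ i j, i < k → j < k → hasAB cs i → hasBA cs j → ¬ (i + 2 ≤ j ∨ j + 2 ≤ i)

lemma go_iff (cs : List Char) :
    ∀ (fuel k : Nat) (ab ba : Option Int),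
      cs.length - 1 - k ≤ fuel → LoopInv cs k ab ba →
      (solveGo cs (PySem.List.pyRange (k : Int) ((cs.length : Int) - 1) 1) ab ba = true ↔ Pgood cs) := by
  intro fuel
  induction fuel with
  | zero =>
    intro k ab ba hfuel hInv
    have hk : cs.length - 1 ≤ k := by omega
    have hnil : PySem.List.pyRange (k : Int) ((cs.length : Int) - 1) 1 = [] := by
      apply PySem.List.pyRange_one_eq_nil
      omega
    rw [hnil]
    simp [solveGo]
    rintro ⟨i, j, hA, hB, hgap⟩
    have hi := prefix2_length hA
    have hj := prefix2_length hB
    exact hInv.2.2 i j (by omega) (by omega) hA hB hgap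
  | succ fuel ih =>
    intro k ab ba hfuel hInv
    by_cases hk : (k : Int) < (cs.length : Int) - 1
    · rw [PySem.List.pyRange_one_cons hk]
      rw [solveGo.eq_def]
      simp only []
      have hk' : k + 1 ≤ cs.length - 1 := by omega
      have hsucc : ((k : Int) + 1) = ((k + 1 : Nat) : Int) := by push_cast; ring
      -- the two slice tests
      by_cases hA : hasAB cs k
      · have hpair : PySem.List.slice cs (some (k : Int)) (some ((k : Int) + 2)) = ['A', 'B'] :=
          (slice_eq_pair_iff cs k 'A' 'B').mpr hA
        have hnB : ¬ hasBA cs k := fun hB => not_both hA hB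
        have hpair' : PySem.List.slice cs (some (k : Int)) (some ((k : Int) + 2)) ≠ ['B', 'A'] := by
          rw [hpair]; simp
        match hba : ba with
        | some b =>
          obtain ⟨bN, hbN, hbNk, hbBA, hbMin⟩ := hInv.2.1
          by_cases hgap : 2 ≤ |(k : Int) - b|
          · simp only [hpair, hgap]
            simp
            exact ⟨k, bN, hA, hbBA, Or.inr (by
              subst hbN
              rw [abs_sub_comm] at hgap
              rw [abs_of_nonpos (by omega)] at hgap
              omega)⟩
          · simp only [hpair]
            simp [hgap]
            have hstep : ∀ ab', GoodMin (hasAB cs) (k+1) ab' →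
                (solveGo cs (PySem.List.pyRange ((k:Int)+1) ((cs.length : Int) - 1) 1) ab' (some b) = true ↔ Pgood cs) := by
              intro ab' hg
              rw [hsucc]
              apply ih (k+1) ab' (some b) (by omega)
              refine ⟨hg, ⟨bN, hbN, by omega, hbBA, hbMin⟩, ?_⟩
              intro i j hi hj hAi hBj hg2
              rcases Nat.lt_or_ge i k with hik | hik
              · rcases Nat.lt_or_ge j k with hjk | hjk
                · exact hInv.2.2 i j hik hjk hAi hBj hg2
                · have hjk' : j = k := by omega
                  exact hnB (hjk' ▸ hBj)
              · have hik' : i = k := by omega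
                have hjne : j ≠ k := fun h => hnB (h ▸ hBj)
                have hjk : j < k := by omega
                have hbj : bN ≤ j := hbMin j hBj
                rcases hg2 with h | h
                · omega
                · exact hgap (by
                    subst hbN
                    rw [abs_of_nonneg (by push_cast; omega)]
                    push_cast
                    omega)
            -- evaluate the two if-branches; both lead to the recursion with updated ab
            match hab : ab with
            | some a =>
              obtain ⟨aN, haN, haNk, haAB, haMin⟩ := hInv.1
              have hmin : min (k : Int) a = a := by subst haN; simp; omega
              simp only [hmin]
              try simp [hpair, hpair']
              exact hstep (some a) ⟨aN, haN, by omega, haAB, haMin⟩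
            | none =>
              try simp [hpair, hpair']
              exact hstep (some (k : Int)) ⟨k, rfl, by omega, hA, by
                intro i hAi
                by_contra hcon
                exact hInv.1 i (by omega) hAi⟩
        | none =>
          simp only [hpair]
          simp
          have hstep : ∀ ab', GoodMin (hasAB cs) (k+1) ab' →
              (solveGo cs (PySem.List.pyRange ((k:Int)+1) ((cs.length : Int) - 1) 1) ab' none = true ↔ Pgood cs) := by
            intro ab' hg
            rw [hsucc]
            apply ih (k+1) ab' none (by omega)
            refine ⟨hg, ?_, ?_⟩
            · intro j hj hBj
              rcases Nat.lt_or_ge j k with h | h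
              · exact hInv.2.1 j h hBj
              · have : j = k := by omega
                exact hnB (this ▸ hBj)
            · intro i j hi hj hAi hBj hg2
              have hjk : j < k := by
                rcases Nat.lt_or_ge j k with h | h
                · exact h
                · exact absurd (hnB (show j = k by omega ▸ hBj)) (by simp)
              exact hInv.2.1 j hjk hBj
          match hab : ab with
          | some a =>
            obtain ⟨aN, haN, haNk, haAB, haMin⟩ := hInv.1
            have hmin : min (k : Int) a = a := by subst haN; simp; omega
            simp only [hmin]
            try simp [hpair, hpair']
            exact hstep (some a) ⟨aN, haN, by omega, haAB, haMin⟩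
          | none =>
            try simp [hpair, hpair']
            exact hstep (some (k : Int)) ⟨k, rfl, by omega, hA, by
              intro i hAi
              by_contra hcon
              exact hInv.1 i (by omega) hAi⟩
      · by_cases hB : hasBA cs k
        · have hpair : PySem.List.slice cs (some (k : Int)) (some ((k : Int) + 2)) = ['B', 'A'] :=
            (slice_eq_pair_iff cs k 'B' 'A').mpr hB
          have hpairA : PySem.List.slice cs (some (k : Int)) (some ((k : Int) + 2)) ≠ ['A', 'B'] := by
            rw [hpair]; simp
          have hstepB : ∀ ab' ba', GoodMin (hasAB cs) (k+1) ab' → GoodMin (hasBA cs) (k+1) ba' →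
              (∀ i, i < k → hasAB cs i → ¬ (i + 2 ≤ k)) →
              (solveGo cs (PySem.List.pyRange ((k:Int)+1) ((cs.length : Int) - 1) 1) ab' ba' = true ↔ Pgood cs) := by
            intro ab' ba' hga hgb hno
            rw [hsucc]
            apply ih (k+1) ab' ba' (by omega)
            refine ⟨hga, hgb, ?_⟩
            intro i j hi hj hAi hBj hg2
            have hine : i ≠ k := fun h => hA (h ▸ hAi)
            have hik : i < k := by omega
            rcases Nat.lt_or_ge j k with hjk | hjk
            · exact hInv.2.2 i j hik hjk hAi hBj hg2
            · have hjk' : j = k := by omega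
              subst hjk'
              rcases hg2 with h | h
              · exact hno i hik hAi h
              · omega
          match hab : ab with
          | some a =>
            obtain ⟨aN, haN, haNk, haAB, haMin⟩ := hInv.1
            by_cases hgap : 2 ≤ |(k : Int) - a|
            · simp [hpair, hpairA, hgap]
              exact ⟨aN, k, haAB, hB, Or.inl (by
                subst haN
                rw [abs_of_nonneg (by push_cast; omega)] at hgap
                push_cast at hgap
                omega)⟩
            · have hno : ∀ i, i < k → hasAB cs i → ¬ (i + 2 ≤ k) := by
                intro i hik hAi hcon
                apply hgap
                have := haMin i hAi
                subst haN
                rw [abs_of_nonneg (by push_cast; omega)]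
                push_cast
                omega
              have hga : GoodMin (hasAB cs) (k+1) (some a) := ⟨aN, haN, by omega, haAB, haMin⟩
              match hba : ba with
              | some b =>
                obtain ⟨bN, hbN, hbNk, hbBA, hbMin⟩ := hInv.2.1
                have hmin : min (k : Int) b = b := by subst hbN; simp; omega
                simp [hpair, hpairA, hgap, hmin]
                exact hstepB (some a) (some b) hga ⟨bN, hbN, by omega, hbBA, hbMin⟩ hno
              | none =>
                simp [hpair, hpairA, hgap]
                exact hstepB (some a) (some (k : Int)) hga
                  ⟨k, rfl, by omega, hB, by
                    intro i hBi
                    by_contra hcon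
                    exact hInv.2.1 i (by omega) hBi⟩ hno
          | none =>
            have hga : GoodMin (hasAB cs) (k+1) none := by
              intro i hik hAi
              rcases Nat.lt_or_ge i k with h | h
              · exact hInv.1 i h hAi
              · exact hA (show i = k by omega ▸ hAi)
            have hno : ∀ i, i < k → hasAB cs i → ¬ (i + 2 ≤ k) :=
              fun i hik hAi _ => hInv.1 i hik hAi
            match hba : ba with
            | some b =>
              obtain ⟨bN, hbN, hbNk, hbBA, hbMin⟩ := hInv.2.1
              have hmin : min (k : Int) b = b := by subst hbN; simp; omega
              simp [hpair, hpairA, hmin]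
              exact hstepB none (some b) hga ⟨bN, hbN, by omega, hbBA, hbMin⟩ hno
            | none =>
              simp [hpair, hpairA]
              exact hstepB none (some (k : Int)) hga
                ⟨k, rfl, by omega, hB, by
                  intro i hBi
                  by_contra hcon
                  exact hInv.2.1 i (by omega) hBi⟩ hno
        · -- neither "AB" nor "BA" at k
          have hpairA : PySem.List.slice cs (some (k : Int)) (some ((k : Int) + 2)) ≠ ['A', 'B'] :=
            fun h => hA ((slice_eq_pair_iff cs k 'A' 'B').mp h)
          have hpairB : PySem.List.slice cs (some (k : Int)) (some ((k : Int) + 2)) ≠ ['B', 'A'] :=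
            fun h => hB ((slice_eq_pair_iff cs k 'B' 'A').mp h)
          simp [hpairA, hpairB]
          rw [hsucc]
          apply ih (k+1) ab ba (by omega)
          refine ⟨?_, ?_, ?_⟩
          · match hab : ab with
            | some a =>
              obtain ⟨aN, haN, haNk, haAB, haMin⟩ := hInv.1
              exact ⟨aN, haN, by omega, haAB, haMin⟩
            | none =>
              intro i hik hAi
              rcases Nat.lt_or_ge i k with h | h
              · exact hInv.1 i h hAi
              · exact hA (show i = k by omega ▸ hAi)
          · match hba : ba with
            | some b =>
              obtain ⟨bN, hbN, hbNk, hbBA, hbMin⟩ := hInv.2.1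
              exact ⟨bN, hbN, by omega, hbBA, hbMin⟩
            | none =>
              intro j hjk hBj
              rcases Nat.lt_or_ge j k with h | h
              · exact hInv.2.1 j h hBj
              · exact hB (show j = k by omega ▸ hBj)
          · intro i j hi hj hAi hBj hg2
            have hine : i ≠ k := fun h => hA (h ▸ hAi)
            have hjne : j ≠ k := fun h => hB (h ▸ hBj)
            exact hInv.2.2 i j (by omega) (by omega) hAi hBj hg2
    · -- range empty
      have hnil : PySem.List.pyRange (k : Int) ((cs.length : Int) - 1) 1 = [] := by
        apply PySem.List.pyRange_one_eq_nil
        omega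
      rw [hnil]
      simp [solveGo]
      rintro ⟨i, j, hA, hB, hgap⟩
      have hi := prefix2_length hA
      have hj := prefix2_length hB
      exact hInv.2.2 i j (by omega) (by omega) hA hB hgap

lemma solve_iff (s : String) : solve s = true ↔ Pgood s.toList := by
  have h := go_iff s.toList s.toList.length 0 none none (by omega)
    ⟨fun i hi => absurd hi (Nat.not_lt_zero i),
     fun i hi => absurd hi (Nat.not_lt_zero i),
     fun i j hi _ => absurd hi (Nat.not_lt_zero i)⟩
  simpa [solve] using h

lemma alt_iff (s : String) : solve_alt s = true ↔ Pgood s.toList := by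
  have hABs : ("AB" : String).toList = ['A', 'B'] := rfl
  have hBAs : ("BA" : String).toList = ['B', 'A'] := rfl
  simp only [solve_alt, PySem.Str.find_eq, PySem.Str.findFrom_eq, hABs, hBAs]
  by_cases ha : PySem.Chars.find s.toList ['A', 'B'] = -1
  · rw [if_pos (Or.inl ha)]
    simp only [Bool.false_eq_true, false_iff]
    rintro ⟨i, j, hAi, hBj, -⟩
    exact ((PySem.Chars.find_eq_neg_one_iff _ _).mp ha) ((infix_iff_exists _ _).mpr ⟨i, hAi⟩)
  · by_cases hb : PySem.Chars.find s.toList ['B', 'A'] = -1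
    · rw [if_pos (Or.inr hb)]
      simp only [Bool.false_eq_true, false_iff]
      rintro ⟨i, j, hAi, hBj, -⟩
      exact ((PySem.Chars.find_eq_neg_one_iff _ _).mp hb) ((infix_iff_exists _ _).mpr ⟨j, hBj⟩)
    · rw [if_neg (not_or.mpr ⟨ha, hb⟩)]
      have ha0 : 0 ≤ PySem.Chars.find s.toList ['A', 'B'] := by
        have := PySem.Chars.neg_one_le_find s.toList ['A', 'B']
        omega
      have hb0 : 0 ≤ PySem.Chars.find s.toList ['B', 'A'] := by
        have := PySem.Chars.neg_one_le_find s.toList ['B', 'A']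
        omega
      obtain ⟨haP, haMin⟩ := PySem.Chars.find_spec ha0
      obtain ⟨hbP, hbMin⟩ := PySem.Chars.find_spec hb0
      have hfa : PySem.Chars.find s.toList ['A', 'B'] =
          (((PySem.Chars.find s.toList ['A', 'B']).toNat : Nat) : Int) :=
        (Int.toNat_of_nonneg ha0).symm
      have hfb : PySem.Chars.find s.toList ['B', 'A'] =
          (((PySem.Chars.find s.toList ['B', 'A']).toNat : Nat) : Int) :=
        (Int.toNat_of_nonneg hb0).symm
      generalize haN : (PySem.Chars.find s.toList ['A', 'B']).toNat = aN at *
      generalize hbN : (PySem.Chars.find s.toList ['B', 'A']).toNat = bN at *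
      have haLen : aN + 2 ≤ s.toList.length := prefix2_length haP
      have hbLen : bN + 2 ≤ s.toList.length := prefix2_length hbP
      have e1 : PySem.Chars.find s.toList ['B', 'A'] + 2 = ((bN + 2 : Nat) : Int) := by
        rw [hfb]; push_cast; ring
      have e2 : PySem.Chars.find s.toList ['A', 'B'] + 2 = ((aN + 2 : Nat) : Int) := by
        rw [hfa]; push_cast; ring
      rw [e1, e2]
      simp only [Bool.or_eq_true, decide_eq_true_eq]
      rw [Ne, Ne, PySem.Chars.findFrom_natCast_eq_neg_one_iff _ _ (bN + 2) hbLen,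
        PySem.Chars.findFrom_natCast_eq_neg_one_iff _ _ (aN + 2) haLen,
        not_not, not_not, infix_iff_exists, infix_iff_exists]
      constructor
      · rintro (⟨j, hj⟩ | ⟨j, hj⟩)
        · rw [List.drop_drop] at hj
          exact ⟨_, bN, hj, hbP, Or.inr (by omega)⟩
        · rw [List.drop_drop] at hj
          exact ⟨aN, _, haP, hj, Or.inl (by omega)⟩
      · rintro ⟨i, j, hAi, hBj, hg | hg⟩
        · right
          have haNi : aN ≤ i := by
            by_contra h
            exact haMin i (by omega) hAi
          refine ⟨j - (aN + 2), ?_⟩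
          rw [List.drop_drop]
          have harb : ∀ m, m = j → (['B', 'A'] : List Char) <+: List.drop m s.toList :=
            fun m hm => hm ▸ hBj
          exact harb _ (by omega)
        · left
          have hbNj : bN ≤ j := by
            by_contra h
            exact hbMin j (by omega) hBj
          refine ⟨i - (bN + 2), ?_⟩
          rw [List.drop_drop]
          have harb : ∀ m, m = i → (['A', 'B'] : List Char) <+: List.drop m s.toList :=
            fun m hm => hm ▸ hAi
          exact harb _ (by omega)

-- ===== VERDICT (by name: the statement is the Claim_ definition above) =====
theorem solve_spec : Claim_equal_solve := by
  intro s _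
  unfold Spec_solve
  have h1 := solve_iff s
  have h2 := alt_iff s
  cases hA : solve s <;> cases hB : solve_alt s <;> simp_all
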